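-- pv_equiv track=rewrite | github.com/wissalkas/IA_Detection_of_fake_News_COVID-19 | Interface/gui.py | vectorizetweet
-- ===== SOURCE A (Python) =====
-- def vectorizetweet(text,vocab):
--     d = dict()
--     for word in vocab:
--         d[word]=0
--     for word in str(text).split():
--         if word  in vocab:
--             d[word]+=1
--     return list(d.values())
-- ===== SOURCE B (Python) =====
-- def vectorizetweet(text, vocab):
--     # Count every token of the text once, then project the frequency
--     # table onto vocab (the dict collapses duplicate vocab words in order).
--     cnt = {}
--     for word in str(text).split():
--         cnt[word] = cnt.get(word, 0) + 1
--     d = {}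
--     for word in vocab:
--         d[word] = cnt.get(word, 0)
--     return list(d.values())
-- ===== Notes on version B (the rewrite author's own statement) =====
-- stated objective: alternative
-- what changed: A scans the text testing each token for list membership in vocab and increments in place; B builds a frequency table of all tokens in one pass and then projects it onto vocab, eliminating the membership-test branch.
import Mathlib
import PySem

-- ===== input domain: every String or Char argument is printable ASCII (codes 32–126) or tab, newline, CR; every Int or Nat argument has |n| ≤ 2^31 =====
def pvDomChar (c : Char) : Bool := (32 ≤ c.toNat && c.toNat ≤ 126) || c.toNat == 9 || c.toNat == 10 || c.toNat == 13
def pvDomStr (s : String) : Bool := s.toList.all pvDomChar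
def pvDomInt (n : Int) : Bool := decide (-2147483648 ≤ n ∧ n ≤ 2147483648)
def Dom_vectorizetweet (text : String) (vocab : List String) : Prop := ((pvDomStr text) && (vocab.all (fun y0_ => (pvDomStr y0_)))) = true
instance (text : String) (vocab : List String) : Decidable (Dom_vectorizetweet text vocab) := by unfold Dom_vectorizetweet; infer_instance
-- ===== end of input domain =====

-- B counts every token of the text once and then projects the frequency table onto vocab,
-- removing A's per-token membership test in vocab (alternative count-then-project structure).


-- ===== PORT A =====
-- d[word] += 1 is ported as modify word 0 (· + 1); the key is always present there
-- (every word tested 'word in vocab' was inserted by the first loop), so the default 0 is never used.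
def vectorizetweet (text : String) (vocab : List String) : List Int :=
  let d : PySem.Dict String Int := vocab.foldl (fun d word => d.insert word 0) PySem.Dict.empty
  let d := (PySem.Str.split₀ text).foldl
    (fun d word => if word ∈ vocab then d.modify word 0 (· + 1) else d) d
  d.values

-- ===== PORT B =====
def vectorizetweet_alt (text : String) (vocab : List String) : List Int :=
  let cnt : PySem.Dict String Int := (PySem.Str.split₀ text).foldl
    (fun c word => c.insert word (c.getD word 0 + 1)) PySem.Dict.empty
  let d : PySem.Dict String Int := vocab.foldl
    (fun d word => d.insert word (cnt.getD word 0)) PySem.Dict.empty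
  d.values

-- ===== PRECONDITION & SPEC =====
def Spec_vectorizetweet (text : String) (vocab : List String) (out : List Int) : Prop := out = vectorizetweet_alt text vocab
instance (text : String) (vocab : List String) (out : List Int) : Decidable (Spec_vectorizetweet text vocab out) := by unfold Spec_vectorizetweet; infer_instance

-- ===== CLAIM (what is proved, stated in full; the proofs are below) =====
def Claim_equal_vectorizetweet : Prop := ∀ (text : String) (vocab : List String), Dom_vectorizetweet text vocab → Spec_vectorizetweet text vocab (vectorizetweet text vocab)

-- ===== LEMMAS AND PROOFS =====

-- A's first loop: keys are the distinct vocab words in order, every stored value is 0.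
theorem initA_keys (vocab : List String) :
    (vocab.foldl (fun d word => d.insert word 0) (PySem.Dict.empty : PySem.Dict String Int)).keys
      = PySem.Set.ofList vocab := by
  rw [PySem.Dict.keys_foldl_insert]
  simp [PySem.Dict.keys_empty, PySem.Set.update_nil_left]

theorem initA_getD (vocab : List String) (d : PySem.Dict String Int)
    (h : ∀ v, d.getD v 0 = 0) (v : String) :
    (vocab.foldl (fun d word => d.insert word 0) d).getD v 0 = 0 := by
  induction vocab generalizing d with
  | nil => exact h v
  | cons w ws ih =>
    simp only [List.foldl_cons]
    exact ih (d.insert w 0) (fun u => by rw [PySem.Dict.getD_insert]; split <;> simp [h])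

-- A's second loop: keys unchanged, each count grows by the occurrences in the scanned words
-- (only for words in vocab; others keep their value).
theorem loopA (vocab : List String) (ws : List String) (d : PySem.Dict String Int)
    (hk : ∀ v ∈ vocab, v ∈ d.keys) :
    ((ws.foldl (fun d word => if word ∈ vocab then d.modify word 0 (· + 1) else d) d).keys = d.keys)
    ∧ (∀ v, (ws.foldl (fun d word => if word ∈ vocab then d.modify word 0 (· + 1) else d) d).getD v 0
        = d.getD v 0 + (if v ∈ vocab then (ws.count v : Int) else 0)) := by
  induction ws generalizing d with
  | nil => simp
  | cons w ws ih =>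
    simp only [List.foldl_cons]
    by_cases hw : w ∈ vocab
    · have hkd : w ∈ d.keys := hk w hw
      have hc : d.contains w = true := (PySem.Dict.contains_iff_mem_keys d w).mpr hkd
      have hk' : ∀ v ∈ vocab, v ∈ (d.modify w 0 (· + 1)).keys := by
        intro v hv
        rw [PySem.Dict.keys_modify, PySem.Dict.keys_insert_of_contains _ _ hc]
        exact hk v hv
      obtain ⟨ihk, ihg⟩ := ih (d.modify w 0 (· + 1)) hk'
      refine ⟨?_, ?_⟩
      · rw [if_pos hw, ihk, PySem.Dict.keys_modify, PySem.Dict.keys_insert_of_contains _ _ hc]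
      · intro v
        rw [if_pos hw, ihg v, PySem.Dict.getD_modify]
        by_cases hvw : v = w
        · subst hvw
          simp [hw]
          ring
        · rw [if_neg hvw]
          by_cases hv : v ∈ vocab
          · simp [hv, Ne.symm hvw]
          · simp [hv]
    · obtain ⟨ihk, ihg⟩ := ih d hk
      refine ⟨by rw [if_neg hw, ihk], ?_⟩
      intro v
      rw [if_neg hw, ihg v]
      by_cases hv : v ∈ vocab
      · have : w ≠ v := fun h => hw (h ▸ hv)
        simp [hv, this]
      · simp [hv]

-- B's projection loop: each key ends with its count from cnt; keys are distinct vocab words.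
theorem loopB (cnt : PySem.Dict String Int) (vocab : List String) (d : PySem.Dict String Int) (v : String) :
    (vocab.foldl (fun d word => d.insert word (cnt.getD word 0)) d).getD v 0
      = if v ∈ vocab then cnt.getD v 0 else d.getD v 0 := by
  induction vocab generalizing d with
  | nil => simp
  | cons w ws ih =>
    simp only [List.foldl_cons]
    rw [ih]
    by_cases hv : v ∈ ws
    · simp [hv]
    · rw [if_neg hv, PySem.Dict.getD_insert]
      by_cases hvw : v = w <;> simp [hvw, hv]

theorem loopB_keys (cnt : PySem.Dict String Int) (vocab : List String) :
    (vocab.foldl (fun d word => d.insert word (cnt.getD word 0)) (PySem.Dict.empty : PySem.Dict String Int)).keys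
      = PySem.Set.ofList vocab := by
  rw [PySem.Dict.keys_foldl_insert]
  simp [PySem.Dict.keys_empty, PySem.Set.update_nil_left]

-- ===== VERDICT (by name: the statement is the Claim_ definition above) =====
theorem vectorizetweet_spec : Claim_equal_vectorizetweet := by
  unfold Claim_equal_vectorizetweet Spec_vectorizetweet
  intro text vocab _
  unfold vectorizetweet vectorizetweet_alt
  simp only
  set ws := PySem.Str.split₀ text with hws
  set d0 := vocab.foldl (fun d word => d.insert word 0) (PySem.Dict.empty : PySem.Dict String Int) with hd0
  have hk0 : ∀ v ∈ vocab, v ∈ d0.keys := by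
    intro v hv; rw [hd0, initA_keys]; exact (PySem.Set.mem_ofList vocab v).mpr hv
  obtain ⟨hAk, hAg⟩ := loopA vocab ws d0 hk0
  -- cnt in B is Counter(ws)
  have hcnt : ∀ v, ((ws.foldl (fun c word => c.insert word (c.getD word 0 + 1))
      (PySem.Dict.empty : PySem.Dict String Int)).getD v 0) = (ws.count v : Int) := by
    intro v
    rw [PySem.Dict.foldl_insert_getD_add_one_eq_counter, PySem.Dict.getD_counter]
  -- both value lists via values_eq_map_keys over the same key list
  have hAnd : (ws.foldl (fun d word => if word ∈ vocab then d.modify word 0 (· + 1) else d) d0).keys.Nodup := by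
    rw [hAk, hd0, initA_keys]; exact PySem.Set.nodup_ofList vocab
  have hBnd : ((vocab.foldl (fun d word => d.insert word
        ((ws.foldl (fun c word => c.insert word (c.getD word 0 + 1)) (PySem.Dict.empty : PySem.Dict String Int)).getD word 0))
        (PySem.Dict.empty : PySem.Dict String Int))).keys.Nodup := by
    rw [loopB_keys]; exact PySem.Set.nodup_ofList vocab
  rw [PySem.Dict.values_eq_map_keys _ hAnd 0, PySem.Dict.values_eq_map_keys _ hBnd 0,
      hAk, hd0, initA_keys, loopB_keys]
  apply List.map_congr_left
  intro v hv
  have hv' : v ∈ vocab := (PySem.Set.mem_ofList vocab v).mp hv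
  rw [hAg v, if_pos hv', initA_getD vocab PySem.Dict.empty (fun v => PySem.Dict.getD_empty v 0) v,
      loopB, if_pos hv', hcnt v]
  ring
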